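-- pv_equiv track=rewrite | github.com/Kee0304/algo | 230629/230629.py | BinTer
-- ===== SOURCE A (Python) =====
-- def BintoDec(binnum):
--     decnum = 0
--     for index in range(len(binnum)):
--         decnum+=binnum[index]*(2)**(len(binnum)-index-1)
--
--     return decnum
--
-- def TertoDec(ternum):
--     decnum = 0
--     for index in range(len(ternum)):
--         decnum+=ternum[index]*(3)**(len(ternum)-index-1)
--
--     return decnum
--
-- def BinTer(binnum, ternum):
--     # 2진수를 순회하면서
--     for binIndex in range(len(binnum)):
--         copybin = binnum[:]
--
--         # 값을 반대로 바꾸고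
--         if binnum[binIndex] == 0:
--             copybin[binIndex] = 1
--         else:
--             copybin[binIndex] = 0
--
--         # 3진수를 순회하면서
--         for terIndex in range(len(ternum)):
--             copyter = ternum[:]
--
--             # 해당 인덱스를 다른 값으로 교체해본다.
--             for value in range(0,3):
--                 if ternum[terIndex] != value:
--                     copyter[terIndex] = value
--
--                     # 비교해서 같으면 성공
--                     if BintoDec(copybin) == TertoDec(copyter):
--                         return BintoDec(copybin)
-- ===== SOURCE B (Python) =====
-- def BinTer(binnum, ternum):
--     # decimal values of the unmodified numerals (Horner)
--     T = 0
--     for d in ternum: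
--         T = T * 3 + d
--     B0 = 0
--     for d in binnum:
--         B0 = B0 * 2 + d
--     nt = len(ternum)
--     # every decimal value reachable by replacing one ternary digit
--     cands = {T + (v - d) * 3 ** (nt - 1 - i)
--              for i, d in enumerate(ternum)
--              for v in range(3) if v != d}
--     # first bit flip whose decimal value is reachable on the ternary side
--     nb = len(binnum)
--     for i, d in enumerate(binnum):
--         D = B0 + ((1 if d == 0 else 0) - d) * 2 ** (nb - 1 - i)
--         if D in cands:
--             return D
--     return None
-- ===== Notes on version B (the rewrite author's own statement) =====
-- stated objective: faster
-- what changed: Replaces A's triple nested scan (re-copying and re-evaluating whole numerals for every bin-flip/ter-edit pair) by Horner-evaluated base values, a precomputed set of all values reachable by one ternary-digit edit, and one O(1)-membership pass over the binary digits.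
import Mathlib
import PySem

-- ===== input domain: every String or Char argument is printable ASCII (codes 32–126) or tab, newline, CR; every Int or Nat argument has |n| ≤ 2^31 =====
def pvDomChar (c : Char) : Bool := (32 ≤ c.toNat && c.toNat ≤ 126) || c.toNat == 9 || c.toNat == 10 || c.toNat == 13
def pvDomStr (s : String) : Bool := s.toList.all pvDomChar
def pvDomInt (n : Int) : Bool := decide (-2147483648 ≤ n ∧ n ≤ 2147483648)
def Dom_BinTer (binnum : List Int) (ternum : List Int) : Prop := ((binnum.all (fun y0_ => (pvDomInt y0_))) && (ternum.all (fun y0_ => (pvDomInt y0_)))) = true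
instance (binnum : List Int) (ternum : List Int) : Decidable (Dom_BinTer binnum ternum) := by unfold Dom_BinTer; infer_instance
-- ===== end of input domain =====

-- B replaces A's triple nested scan by Horner base values, a precomputed set of all
-- one-digit ternary edits, and a single O(1)-membership pass over the binary digits
-- (objective: faster, asymptotic).

-- ===== PORT A =====
def BintoDec (binnum : List Int) : Int :=
  (List.range binnum.length).foldl
    (fun decnum index => decnum + binnum.getD index 0 * 2 ^ (binnum.length - index - 1)) 0

def TertoDec (ternum : List Int) : Int :=
  (List.range ternum.length).foldl
    (fun decnum index => decnum + ternum.getD index 0 * 3 ^ (ternum.length - index - 1)) 0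

def BinTer (binnum : List Int) (ternum : List Int) : Option Int :=
  (List.range binnum.length).findSome? fun binIndex =>
    let copybin := binnum.set binIndex (if binnum.getD binIndex 0 = 0 then 1 else 0)
    (List.range ternum.length).findSome? fun terIndex =>
      (List.range 3).findSome? fun (value : Nat) =>
        if ternum.getD terIndex 0 ≠ (value : Int) then
          let copyter := ternum.set terIndex (value : Int)
          if BintoDec copybin = TertoDec copyter then some (BintoDec copybin) else none
        else none

-- ===== PORT B =====
def BinTer_alt (binnum : List Int) (ternum : List Int) : Option Int :=
  let T := ternum.foldl (fun a d => a * 3 + d) 0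
  let B0 := binnum.foldl (fun a d => a * 2 + d) 0
  let nt := ternum.length
  let cands : PySem.Set Int := PySem.Set.ofList
    (ternum.zipIdx.flatMap fun p =>
      (List.range 3).filterMap fun (v : Nat) =>
        if (v : Int) ≠ p.1 then some (T + ((v : Int) - p.1) * 3 ^ (nt - 1 - p.2)) else none)
  let nb := binnum.length
  binnum.zipIdx.findSome? fun p =>
    let D := B0 + ((if p.1 = 0 then (1 : Int) else 0) - p.1) * 2 ^ (nb - 1 - p.2)
    if PySem.Set.contains cands D then some D else none

-- ===== PRECONDITION & SPEC =====
def Spec_BinTer (binnum : List Int) (ternum : List Int) (out : Option Int) : Prop := out = BinTer_alt binnum ternum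
instance (binnum : List Int) (ternum : List Int) (out : Option Int) : Decidable (Spec_BinTer binnum ternum out) := by unfold Spec_BinTer; infer_instance

-- ===== CLAIM (what is proved, stated in full; the proofs are below) =====
def Claim_equal_BinTer : Prop := ∀ (binnum : List Int) (ternum : List Int), Dom_BinTer binnum ternum → Spec_BinTer binnum ternum (BinTer binnum ternum)

-- ===== LEMMAS AND PROOFS =====

-- Horner evaluation with an accumulator
theorem foldl_horner_acc (b : Int) (l : List Int) (a : Int) :
    l.foldl (fun s d => s * b + d) a = a * b ^ l.length + l.foldl (fun s d => s * b + d) 0 := by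
  induction l generalizing a with
  | nil => simp
  | cons x xs ih =>
    simp only [List.foldl_cons, List.length_cons]
    rw [ih (a * b + x), ih (0 * b + x)]
    ring

theorem horner_cons (b : Int) (x : Int) (xs : List Int) :
    (x :: xs).foldl (fun s d => s * b + d) 0
      = x * b ^ xs.length + xs.foldl (fun s d => s * b + d) 0 := by
  simp only [List.foldl_cons]
  rw [foldl_horner_acc]
  ring_nf

-- effect of replacing one digit on the Horner value
theorem horner_set (b : Int) :
    ∀ (l : List Int) (i : Nat) (v : Int), i < l.length →
    (l.set i v).foldl (fun s d => s * b + d) 0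
      = l.foldl (fun s d => s * b + d) 0 + (v - l.getD i 0) * b ^ (l.length - 1 - i) := by
  intro l
  induction l with
  | nil => intro i v h; simp at h
  | cons x xs ih =>
    intro i v h
    cases i with
    | zero =>
      simp only [List.set_cons_zero, List.getD_cons_zero, List.length_cons,
        Nat.add_sub_cancel, Nat.sub_zero]
      rw [horner_cons, horner_cons]
      ring
    | succ j =>
      have hj : j < xs.length := by simpa using h
      simp only [List.set_cons_succ, List.getD_cons_succ, List.length_cons]
      rw [horner_cons, horner_cons, ih j v hj, List.length_set]
      have hexp : xs.length + 1 - 1 - (j + 1) = xs.length - 1 - j := by omega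
      rw [hexp]
      ring

-- A's positional sum equals B's Horner loop
theorem sumdec_eq_horner (b : Int) :
    ∀ l : List Int,
    (List.range l.length).foldl (fun d i => d + l.getD i 0 * b ^ (l.length - i - 1)) 0
      = l.foldl (fun s d => s * b + d) 0 := by
  intro l
  induction l with
  | nil => simp
  | cons x xs ih =>
    rw [horner_cons, ← ih]
    rw [PySem.List.foldl_add, PySem.List.foldl_add]
    simp only [List.length_cons, List.range_succ_eq_map, List.map_cons, List.map_map,
      List.sum_cons, List.getD_cons_zero]
    have hfun : ((fun i => (x :: xs).getD i 0 * b ^ (xs.length + 1 - i - 1)) ∘ Nat.succ)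
        = fun i => xs.getD i 0 * b ^ (xs.length - i - 1) := by
      funext i
      simp only [Function.comp, Nat.succ_eq_add_one, List.getD_cons_succ]
      congr 2
      omega
    rw [hfun]
    have hexp : xs.length + 1 - 0 - 1 = xs.length := by omega
    rw [hexp]
    ring

-- findSome? whose branches can only yield one fixed value
theorem findSome?_const_ite {A B : Type} [DecidableEq B] (c : B) :
    ∀ (l : List A) (f : A → Option B), (∀ x ∈ l, f x = none ∨ f x = some c) →
    l.findSome? f = if ∃ x ∈ l, f x = some c then some c else none := by
  intro l
  induction l with
  | nil => intro f _; simp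
  | cons x xs ih =>
    intro f h
    rcases h x (by simp) with h0 | h0
    · simp only [List.findSome?_cons, h0]
      rw [ih f (fun y hy => h y (by simp [hy]))]
      by_cases he : ∃ y ∈ xs, f y = some c
      · rw [if_pos he, if_pos (by obtain ⟨y, hy, hfy⟩ := he; exact ⟨y, by simp [hy], hfy⟩)]
      · have hne : ¬ ∃ y ∈ x :: xs, f y = some c := by
          rintro ⟨y, hy, hfy⟩
          rcases List.mem_cons.mp hy with rfl | hy'
          · rw [h0] at hfy; cases hfy
          · exact he ⟨y, hy', hfy⟩
        rw [if_neg he, if_neg hne]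
    · simp only [List.findSome?_cons, h0]
      rw [if_pos ⟨x, by simp, h0⟩]

theorem findSome?_congr_mem {A B : Type} :
    ∀ (l : List A) (f g : A → Option B), (∀ x ∈ l, f x = g x) →
    l.findSome? f = l.findSome? g := by
  intro l
  induction l with
  | nil => intro f g _; simp
  | cons x xs ih =>
    intro f g h
    simp only [List.findSome?_cons, h x (by simp)]
    cases g x with
    | none => exact ih f g (fun y hy => h y (by simp [hy]))
    | some v => rfl

-- a findSome? over zipIdx is a findSome? over indices
theorem zipIdx_findSome? {A B : Type} (d : A) :
    ∀ (l : List A) (k : Nat) (f : A × Nat → Option B),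
    (l.zipIdx k).findSome? f = (List.range l.length).findSome? (fun i => f (l.getD i d, i + k)) := by
  intro l
  induction l with
  | nil => intro k f; simp
  | cons x xs ih =>
    intro k f
    rw [List.zipIdx_cons]
    simp only [List.length_cons, List.range_succ_eq_map, List.findSome?_cons,
      List.getD_cons_zero, Nat.zero_add]
    cases hfx : f (x, k) with
    | some v => rfl
    | none =>
      rw [List.findSome?_map, ih (k + 1)]
      apply findSome?_congr_mem
      intro i _
      simp only [Function.comp, Nat.succ_eq_add_one, List.getD_cons_succ]
      have : i + 1 + k = i + (k + 1) := by omega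
      rw [this]

-- candidate-set membership ↔ a one-digit ternary edit attains the value
theorem mem_cands_iff (ternum : List Int) (D : Int) :
    (D ∈ (ternum.zipIdx.flatMap fun p =>
        (List.range 3).filterMap fun (v : Nat) =>
          if (v : Int) ≠ p.1 then
            some ((ternum.foldl (fun a d => a * 3 + d) 0) + ((v : Int) - p.1) * 3 ^ (ternum.length - 1 - p.2))
          else none))
    ↔ ∃ ti ∈ List.range ternum.length, ∃ v : Nat, v ∈ List.range 3 ∧
        ternum.getD ti 0 ≠ (v : Int) ∧ D = TertoDec (ternum.set ti (v : Int)) := by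
  have hter : ∀ (i : Nat) (v : Int), i < ternum.length →
      TertoDec (ternum.set i v)
        = ternum.foldl (fun a d => a * 3 + d) 0 + (v - ternum.getD i 0) * 3 ^ (ternum.length - 1 - i) := by
    intro i v hi
    have hlen : (ternum.set i v).length = ternum.length := List.length_set ..
    rw [TertoDec]
    rw [show (List.range (ternum.set i v).length).foldl
        (fun d j => d + (ternum.set i v).getD j 0 * 3 ^ ((ternum.set i v).length - j - 1)) 0
      = (ternum.set i v).foldl (fun s d => s * 3 + d) 0 from sumdec_eq_horner 3 _]
    rw [horner_set 3 ternum i v hi, ← sumdec_eq_horner 3 ternum, sumdec_eq_horner 3 ternum]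
  simp only [List.mem_flatMap, List.exists_mem_zipIdx', List.mem_filterMap, List.mem_range]
  constructor
  · rintro ⟨i, hi, v, hv, hite⟩
    split at hite
    · rename_i hne
      injection hite with hD
      have hget : ternum.getD i 0 = ternum[i] := List.getD_eq_getElem ternum 0 hi
      refine ⟨i, hi, v, hv, by rw [hget]; exact fun h => hne h.symm, ?_⟩
      rw [hter i (v : Int) hi, hget]
      omega
    · cases hite
  · rintro ⟨ti, hti, v, hv, hne, hD⟩
    have hget : ternum.getD ti 0 = ternum[ti] := List.getD_eq_getElem ternum 0 hti
    refine ⟨ti, hti, v, hv, ?_⟩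
    rw [if_pos (by rw [← hget]; exact fun h => hne h.symm)]
    rw [hD, hter ti (v : Int) hti, hget]

-- the flipped-bit decimal value, in B's delta form
theorem bintodec_set_flip (binnum : List Int) (i : Nat) (hi : i < binnum.length) :
    BintoDec (binnum.set i (if binnum.getD i 0 = 0 then 1 else 0))
      = binnum.foldl (fun a d => a * 2 + d) 0
        + ((if binnum.getD i 0 = 0 then (1 : Int) else 0) - binnum.getD i 0)
          * 2 ^ (binnum.length - 1 - i) := by
  rw [BintoDec, sumdec_eq_horner 2, horner_set 2 binnum _ _ hi]

-- ===== VERDICT (by name: the statement is the Claim_ definition above) =====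
theorem BinTer_spec : Claim_equal_BinTer := by
  intro binnum ternum _
  unfold Spec_BinTer BinTer BinTer_alt
  rw [zipIdx_findSome? (0 : Int)]
  apply findSome?_congr_mem
  intro i hi
  have hilt : i < binnum.length := List.mem_range.mp hi
  dsimp only
  simp only [Nat.add_zero]
  set c := BintoDec (binnum.set i (if binnum.getD i 0 = 0 then 1 else 0)) with hc
  -- A's inner two loops collapse to a single test
  have hinner : ∀ ti ∈ List.range ternum.length,
      ((List.range 3).findSome? fun (value : Nat) =>
        if ternum.getD ti 0 ≠ (value : Int) then
          if c = TertoDec (ternum.set ti (value : Int)) then some c else none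
        else none)
      = if ∃ v : Nat, v ∈ List.range 3 ∧
            (if ternum.getD ti 0 ≠ (v : Int) then
              if c = TertoDec (ternum.set ti (v : Int)) then some c else none
            else none) = some c
        then some c else none := by
    intro ti _
    apply findSome?_const_ite
    intro v _
    split
    · split
      · right; rfl
      · left; rfl
    · left; rfl
  rw [findSome?_congr_mem _ _ _ hinner]
  rw [findSome?_const_ite c _ _ (by
    intro ti _
    split
    · right; rfl
    · left; rfl)]
  have hcond : (∃ ti ∈ List.range ternum.length,
      (if ∃ v : Nat, v ∈ List.range 3 ∧
            (if ternum.getD ti 0 ≠ (v : Int) then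
              if c = TertoDec (ternum.set ti (v : Int)) then some c else none
            else none) = some c
        then some c else none) = some c)
      ↔ ∃ ti ∈ List.range ternum.length, ∃ v : Nat, v ∈ List.range 3 ∧
          ternum.getD ti 0 ≠ (v : Int) ∧ c = TertoDec (ternum.set ti (v : Int)) := by
    constructor
    · rintro ⟨ti, hti, h⟩
      split at h
      · rename_i hv
        obtain ⟨v, hv3, hvs⟩ := hv
        split at hvs
        · split at hvs
          · exact ⟨ti, hti, v, hv3, by assumption, by assumption⟩
          · cases hvs
        · cases hvs
      · cases h
    · rintro ⟨ti, hti, v, hv3, hne, heq⟩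
      refine ⟨ti, hti, ?_⟩
      rw [if_pos ⟨v, hv3, by rw [if_pos hne, if_pos heq]⟩]
  rw [if_congr hcond rfl rfl]
  have hD : binnum.foldl (fun a d => a * 2 + d) 0
      + ((if binnum.getD i 0 = 0 then (1 : Int) else 0) - binnum.getD i 0)
        * 2 ^ (binnum.length - 1 - i) = c := (bintodec_set_flip binnum i hilt).symm
  rw [hD]
  have hmem : (PySem.Set.contains (PySem.Set.ofList
      (ternum.zipIdx.flatMap fun p =>
        (List.range 3).filterMap fun (v : Nat) =>
          if (v : Int) ≠ p.1 then
            some ((ternum.foldl (fun a d => a * 3 + d) 0)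
              + ((v : Int) - p.1) * 3 ^ (ternum.length - 1 - p.2))
          else none)) c = true)
      ↔ (∃ ti ∈ List.range ternum.length, ∃ v : Nat, v ∈ List.range 3 ∧
          ternum.getD ti 0 ≠ (v : Int) ∧ c = TertoDec (ternum.set ti (v : Int))) := by
    rw [PySem.Set.contains_iff, PySem.Set.mem_ofList]
    exact mem_cands_iff ternum c
  by_cases hE : ∃ ti ∈ List.range ternum.length, ∃ v : Nat, v ∈ List.range 3 ∧
      ternum.getD ti 0 ≠ (v : Int) ∧ c = TertoDec (ternum.set ti (v : Int))
  · rw [if_pos hE, if_pos (hmem.mpr hE)]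
  · rw [if_neg hE, if_neg (fun hcontains => hE (hmem.mp hcontains))]
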